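-- pv_equiv track=rewrite | github.com/Moritz72/ToMaChess | scripts/functions_tournament_util.py | get_standings_header_vertical
-- ===== SOURCE A (Python) =====
-- def get_standings_header_vertical(table):
--     header_vertical = []
--     last_entry = None
--     for i, entry in enumerate(table):
--         if last_entry is None or entry[1:] != last_entry[1:]:
--             header_vertical.append(str(i + 1))
--         else:
--             header_vertical.append('')
--         last_entry = entry
--     return header_vertical
-- ===== SOURCE B (Python) =====
-- def get_standings_header_vertical(table):
--     out = []
--     i = 0
--     rest = table
--     while rest:
--         key = rest[0][1:]
--         run = 1
--         while run < len(rest) and rest[run][1:] == key: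
--             run += 1
--         out.append(str(i + 1))
--         out.extend([''] * (run - 1))
--         i += run
--         rest = rest[run:]
--     return out
-- ===== Notes on version B (the rewrite author's own statement) =====
-- stated objective: alternative
-- what changed: Replaces the flat predecessor-comparison pass carrying a last_entry variable with a run-detection loop: an inner scan finds each maximal run of entries sharing the same tail, emits the rank once and blanks for the rest of the run, then jumps past the whole run.
import Mathlib
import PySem

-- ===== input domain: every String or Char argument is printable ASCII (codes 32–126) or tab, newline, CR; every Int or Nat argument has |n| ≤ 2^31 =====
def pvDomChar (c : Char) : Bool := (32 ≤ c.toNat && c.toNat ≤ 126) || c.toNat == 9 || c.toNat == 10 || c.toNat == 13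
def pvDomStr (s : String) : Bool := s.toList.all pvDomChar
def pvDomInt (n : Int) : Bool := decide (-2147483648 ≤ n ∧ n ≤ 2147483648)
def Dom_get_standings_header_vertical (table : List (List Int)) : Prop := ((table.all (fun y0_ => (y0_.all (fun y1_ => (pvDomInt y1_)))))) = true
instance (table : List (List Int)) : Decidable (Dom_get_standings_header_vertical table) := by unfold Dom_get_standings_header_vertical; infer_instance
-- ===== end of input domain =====

-- B replaces A's flat predecessor-comparison pass with a run-detection loop over maximal
-- runs of equal tails (objective: alternative; same results, a different traversal).

-- ===== PORT A =====
-- the for-loop with its (index, last_entry) state, step for step; entry[1:] is PySem.List.slice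
def aGo (i : Int) (last : Option (List Int)) : List (List Int) → List String
  | [] => []
  | entry :: rest =>
      (match last with
       | none => PySem.Int.toStr (i + 1)
       | some l =>
           if PySem.List.slice entry (some 1) none ≠ PySem.List.slice l (some 1) none
           then PySem.Int.toStr (i + 1) else "") :: aGo (i + 1) (some entry) rest

def get_standings_header_vertical (table : List (List Int)) : List String :=
  aGo 0 none table

-- ===== PORT B =====
-- outer while loop over runs; the inner counting while loop is ported as takeWhile,
-- [''] * (run-1) as replicate, rest[run:] as drop
def bGo (i : Int) : List (List Int) → List String
  | [] => []
  | e :: rest =>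
      let same := rest.takeWhile
        (fun f => PySem.List.slice f (some 1) none == PySem.List.slice e (some 1) none)
      PySem.Int.toStr (i + 1) ::
        (List.replicate same.length "" ++ bGo (i + 1 + (same.length : Int)) (rest.drop same.length))
termination_by l => l.length
decreasing_by
  simp only [List.length_drop, List.length_cons]
  omega

def get_standings_header_vertical_alt (table : List (List Int)) : List String :=
  bGo 0 table

-- ===== PRECONDITION & SPEC =====
def Spec_get_standings_header_vertical (table : List (List Int)) (out : List String) : Prop := out = get_standings_header_vertical_alt table
instance (table : List (List Int)) (out : List String) : Decidable (Spec_get_standings_header_vertical table out) := by unfold Spec_get_standings_header_vertical; infer_instance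

-- ===== CLAIM (what is proved, stated in full; the proofs are below) =====
def Claim_equal_get_standings_header_vertical : Prop := ∀ (table : List (List Int)), Dom_get_standings_header_vertical table → Spec_get_standings_header_vertical table (get_standings_header_vertical table)

-- ===== LEMMAS AND PROOFS =====

-- A's continuation after having seen e equals blanks for the run matching e's tail,
-- followed by B's loop restarted past the run.
lemma aGo_some_eq (lst : List (List Int)) : ∀ (j : Int) (e : List Int),
    aGo j (some e) lst =
      List.replicate
        (lst.takeWhile (fun f => PySem.List.slice f (some 1) none == PySem.List.slice e (some 1) none)).length "" ++
      bGo (j + ((lst.takeWhile (fun f => PySem.List.slice f (some 1) none == PySem.List.slice e (some 1) none)).length : Int))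
        (lst.drop (lst.takeWhile (fun f => PySem.List.slice f (some 1) none == PySem.List.slice e (some 1) none)).length) := by
  induction lst with
  | nil => intro j e; simp [aGo, bGo]
  | cons f rest ih =>
    intro j e
    by_cases h : PySem.List.slice f (some 1) none = PySem.List.slice e (some 1) none
    · -- f continues the run: A emits '', B's blank block absorbs it
      have hb : (PySem.List.slice f (some 1) none == PySem.List.slice e (some 1) none) = true :=
        beq_iff_eq.mpr h
      rw [show aGo j (some e) (f :: rest) = "" :: aGo (j + 1) (some f) rest from by
        simp [aGo, h]]
      rw [ih (j + 1) f]
      rw [List.takeWhile_cons_of_pos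
        (p := fun g => PySem.List.slice g (some 1) none == PySem.List.slice e (some 1) none)
        (l := rest) hb]
      simp only [h, List.length_cons, List.replicate_succ, List.drop_succ_cons, List.cons_append]
      have harg : j + (((List.takeWhile (fun f_1 => PySem.List.slice f_1 (some 1) none ==
          PySem.List.slice e (some 1) none) rest).length + 1 : Nat) : Int)
          = j + 1 + ((List.takeWhile (fun f_1 => PySem.List.slice f_1 (some 1) none ==
          PySem.List.slice e (some 1) none) rest).length : Int) := by push_cast; ring
      rw [harg]
    · -- f starts a new run: both sides emit str(j+1) and restart
      have hb : (PySem.List.slice f (some 1) none == PySem.List.slice e (some 1) none) = false := by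
        simp [h]
      rw [show aGo j (some e) (f :: rest) = PySem.Int.toStr (j + 1) :: aGo (j + 1) (some f) rest from by
        simp [aGo, h]]
      rw [ih (j + 1) f]
      simp only [List.takeWhile_cons, hb, Bool.false_eq_true, if_false, List.length_nil,
        Int.natCast_zero, add_zero, List.replicate_zero, List.nil_append, List.drop_zero]
      simp [bGo]

-- ===== VERDICT (by name: the statement is the Claim_ definition above) =====
theorem get_standings_header_vertical_spec : Claim_equal_get_standings_header_vertical := by
  intro table _
  unfold Spec_get_standings_header_vertical get_standings_header_vertical get_standings_header_vertical_alt
  cases table with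
  | nil => simp [aGo, bGo]
  | cons e rest =>
    simp only [aGo, bGo, zero_add]
    rw [aGo_some_eq rest 1 e]
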